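-- pv_equiv track=rewrite | github.com/mhuncovsky/Codewars | solutions/conways_game_of_life.py | croped
-- ===== SOURCE A (Python) =====
-- def croped(lst):
--     maxx = max(x for x in range(len(lst)) if 1 in lst[x])
--     minx = min(x for x in range(len(lst)) if 1 in lst[x])
--     maxy = max(y for y in range(len(lst[0]))\
--                for x in range(len(lst)) if lst[x][y])
--     miny = min(y for y in range(len(lst[0]))\
--                for x in range(len(lst)) if lst[x][y])
--     return [x[miny:maxy+1] for x in lst[minx:maxx+1]]
-- ===== SOURCE B (Python) =====
-- def croped(lst):
--     minx = maxx = miny = maxy = None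
--     for i, row in enumerate(lst):
--         if 1 in row:
--             if minx is None:
--                 minx = i
--             maxx = i
--         for j, v in enumerate(row):
--             if v:
--                 if miny is None or j < miny:
--                     miny = j
--                 if maxy is None or j > maxy:
--                     maxy = j
--     if minx is None or miny is None:
--         raise ValueError("no live cells")
--     return [r[miny:maxy + 1] for r in lst[minx:maxx + 1]]
-- ===== Notes on version B (the rewrite author's own statement) =====
-- stated objective: alternative
-- what changed: Replaces A's four separate min/max generator scans over the grid with a single enumerate pass maintaining running minx/maxx/miny/maxy bounds; Pre_ excludes ragged grids (rows of unequal length), on which A raises IndexError for short rows or silently ignores cells beyond the first row's width in long rows.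
-- outside the precondition, e.g. on croped([[1, 0], [1, 0, 1]]): A returns [[1], [1]], B returns [[1, 0], [1, 0, 1]]
import Mathlib
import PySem

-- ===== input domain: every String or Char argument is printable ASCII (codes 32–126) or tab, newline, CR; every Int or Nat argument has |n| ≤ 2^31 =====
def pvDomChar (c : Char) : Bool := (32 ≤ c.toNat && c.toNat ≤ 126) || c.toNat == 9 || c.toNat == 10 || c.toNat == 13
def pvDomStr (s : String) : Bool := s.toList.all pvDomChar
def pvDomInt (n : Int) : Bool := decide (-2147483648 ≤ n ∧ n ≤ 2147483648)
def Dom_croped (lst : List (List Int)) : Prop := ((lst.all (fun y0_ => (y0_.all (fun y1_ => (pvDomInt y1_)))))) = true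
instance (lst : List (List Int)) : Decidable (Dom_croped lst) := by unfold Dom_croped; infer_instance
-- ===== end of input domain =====

-- B replaces A's four min/max scans with a single running-bounds pass (alternative decomposition, same cost).

-- ===== PORT A =====
def croped (lst : List (List Int)) : List (List Int) :=
  let xidx := (PySem.List.pyRange 0 (lst.length : Int) 1).filter
      (fun x => decide ((1 : Int) ∈ PySem.List.pyGetD lst x []))
  match PySem.List.max? xidx (fun v => v), PySem.List.min? xidx (fun v => v) with
  | some maxx, some minx =>
      let yidx := (PySem.List.pyRange 0 ((PySem.List.pyGetD lst 0 []).length : Int) 1).flatMap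
          (fun y => ((PySem.List.pyRange 0 (lst.length : Int) 1).filter
              (fun x => decide (PySem.List.pyGetD (PySem.List.pyGetD lst x []) y 0 ≠ 0))).map
            (fun _ => y))
      match PySem.List.max? yidx (fun v => v), PySem.List.min? yidx (fun v => v) with
      | some maxy, some miny =>
          (PySem.List.slice lst (some minx) (some (maxx + 1))).map
            (fun r => PySem.List.slice r (some miny) (some (maxy + 1)))
      | _, _ => []  -- unreachable when A returns (Python raised ValueError)
  | _, _ => []      -- Python raised ValueError

-- ===== PORT B =====
def croped_alt (lst : List (List Int)) : List (List Int) :=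
  let st := (PySem.List.enumerate lst 0).foldl
    (fun (st : (Option Int × Option Int) × (Option Int × Option Int)) (p : Int × List Int) =>
      ((if (1 : Int) ∈ p.2 then
          ((if st.1.1.isNone then some p.1 else st.1.1), some p.1)
        else st.1),
       (PySem.List.enumerate p.2 0).foldl
        (fun (yb : Option Int × Option Int) (q : Int × Int) =>
          if q.2 ≠ 0 then
            ((if yb.1.all (fun m => decide (q.1 < m)) then some q.1 else yb.1),
             (if yb.2.all (fun M => decide (q.1 > M)) then some q.1 else yb.2))
          else yb) st.2))
    ((none, none), (none, none))
  if st.1.1.isNone || st.2.1.isNone then []         -- Python raised ValueError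
  else
    (PySem.List.slice lst (some (st.1.1.getD 0)) (some (st.1.2.getD 0 + 1))).map
      (fun r => PySem.List.slice r (some (st.2.1.getD 0)) (some (st.2.2.getD 0 + 1)))

-- ===== PRECONDITION & SPEC =====
-- Pre_ excludes grids on which A raises (empty grid, no cell equal to 1) and ragged grids (rows of
-- unequal length): there A raises IndexError for short rows, or silently ignores cells beyond the
-- first row's width in long rows — a Game-of-Life grid is rectangular.
def Pre_croped (lst : List (List Int)) : Prop :=
  lst ≠ [] ∧ (∀ r ∈ lst, r.length = (lst.headD []).length) ∧ ∃ r ∈ lst, (1 : Int) ∈ r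
instance (lst : List (List Int)) : Decidable (Pre_croped lst) := by unfold Pre_croped; infer_instance
def pvWitness_croped : List (List Int) := [[0, 0, 0], [0, 1, 0], [0, 0, 0]]

def Spec_croped (lst : List (List Int)) (out : List (List Int)) : Prop := out = croped_alt lst
instance (lst : List (List Int)) (out : List (List Int)) : Decidable (Spec_croped lst out) := by unfold Spec_croped; infer_instance

-- ===== CLAIM (what is proved, stated in full; the proofs are below) =====
def Claim_equal_croped : Prop := ∀ (lst : List (List Int)), Dom_croped lst → Pre_croped lst → Spec_croped lst (croped lst)

-- ===== LEMMAS AND PROOFS =====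
-- ---- helper definitions (proof-only) ----
def pvOmin (a : Option Int) (j : Int) : Option Int :=
  some (match a with | none => j | some m => min m j)
def pvOmax (a : Option Int) (j : Int) : Option Int :=
  some (match a with | none => j | some M => max M j)
def pvJs (ps : List (Int × List Int)) : List Int :=
  ((ps.flatMap (fun p => PySem.List.enumerate p.2 0)).filter (fun q => decide (q.2 ≠ 0))).map Prod.fst
def pvLx (ps : List (Int × List Int)) : List Int :=
  (ps.filter (fun p => decide ((1 : Int) ∈ p.2))).map Prod.fst

-- inner cell fold of croped_alt = pvOmin/pvOmax folds over the qualifying column indices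
theorem pv_cellfold (qs : List (Int × Int)) : ∀ (a b : Option Int),
    qs.foldl
      (fun (yb : Option Int × Option Int) (q : Int × Int) =>
        if q.2 ≠ 0 then
          ((if yb.1.all (fun m => decide (q.1 < m)) then some q.1 else yb.1),
           (if yb.2.all (fun M => decide (q.1 > M)) then some q.1 else yb.2))
        else yb) (a, b)
    = (((qs.filter (fun q => decide (q.2 ≠ 0))).map Prod.fst).foldl pvOmin a,
       ((qs.filter (fun q => decide (q.2 ≠ 0))).map Prod.fst).foldl pvOmax b) := by
  induction qs with
  | nil => intro a b; rfl
  | cons q t ih =>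
    intro a b
    by_cases h : q.2 = 0
    · have hf : (decide (q.2 ≠ 0)) = false := by simp [h]
      rw [List.foldl_cons, if_neg (not_not_intro h), List.filter_cons, hf]
      simp only [Bool.false_eq_true, if_false]
      exact ih a b
    · have h1 : (if a.all (fun m => decide (q.1 < m)) then some q.1 else a)
          = pvOmin a q.1 := by
        cases a with
        | none => rfl
        | some m => simp only [pvOmin, Option.all_some]; rcases le_or_gt m q.1 with hc | hc <;>
            simp [min_def, hc, le_of_lt]
      have h2 : (if b.all (fun M => decide (q.1 > M)) then some q.1 else b)
          = pvOmax b q.1 := by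
        cases b with
        | none => rfl
        | some M => simp only [pvOmax, Option.all_some]; rcases le_or_gt q.1 M with hc | hc <;>
            simp [max_def, hc] <;> omega
      have hf : (decide (q.2 ≠ 0)) = true := by simp [h]
      rw [List.foldl_cons, if_pos h, h1, h2, List.filter_cons, hf]
      simp only [if_true, List.map_cons, List.foldl_cons]
      exact ih (pvOmin a q.1) (pvOmax b q.1)

-- whole fold of croped_alt
theorem pv_Bfold (ps : List (Int × List Int)) : ∀ (a b c d : Option Int),
    ps.foldl
      (fun (st : (Option Int × Option Int) × (Option Int × Option Int)) (p : Int × List Int) =>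
        ((if (1 : Int) ∈ p.2 then
            ((if st.1.1.isNone then some p.1 else st.1.1), some p.1)
          else st.1),
         (PySem.List.enumerate p.2 0).foldl
          (fun (yb : Option Int × Option Int) (q : Int × Int) =>
            if q.2 ≠ 0 then
              ((if yb.1.all (fun m => decide (q.1 < m)) then some q.1 else yb.1),
               (if yb.2.all (fun M => decide (q.1 > M)) then some q.1 else yb.2))
            else yb) st.2)) ((a, b), (c, d))
    = ((a.or (pvLx ps).head?, ((pvLx ps).getLast?).or b),
       ((pvJs ps).foldl pvOmin c, (pvJs ps).foldl pvOmax d)) := by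
  induction ps with
  | nil => intro a b c d; simp [pvLx, pvJs]
  | cons p t ih =>
    intro a b c d
    rw [List.foldl_cons]
    rw [pv_cellfold]
    rw [ih]
    have hJ : pvJs (p :: t)
        = ((((PySem.List.enumerate p.2 0).filter (fun q => decide (q.2 ≠ 0))).map Prod.fst)) ++ pvJs t := by
      simp [pvJs, List.flatMap_cons, List.filter_append, List.map_append]
    rw [hJ, List.foldl_append, List.foldl_append]
    by_cases h : (1 : Int) ∈ p.2
    · have hL : pvLx (p :: t) = p.1 :: pvLx t := by simp [pvLx, h]
      have ha : (if a.isNone then some p.1 else a) = a.or (some p.1) := by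
        cases a <;> rfl
      rw [hL]
      simp only [if_pos h, ha, List.head?_cons, List.getLast?_cons, Option.or_assoc,
        Option.some_or]
      cases hlt : (pvLx t).getLast? with
      | none => simp
      | some z => simp
    · have hL : pvLx (p :: t) = pvLx t := by simp [pvLx, h]
      rw [hL]
      simp only [if_neg h]

-- pvOmin/pvOmax folds are Python's min()/max()
theorem pv_ominfold (t : List Int) : ∀ m : Int, t.foldl pvOmin (some m) = some (t.foldl min m) := by
  induction t with
  | nil => intro m; rfl
  | cons x t ih => intro m; rw [List.foldl_cons, List.foldl_cons]; exact ih (min m x)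

theorem pv_omaxfold (t : List Int) : ∀ m : Int, t.foldl pvOmax (some m) = some (t.foldl max m) := by
  induction t with
  | nil => intro m; rfl
  | cons x t ih => intro m; rw [List.foldl_cons, List.foldl_cons]; exact ih (max m x)

theorem pv_minfold_eq_min? (js : List Int) :
    js.foldl pvOmin none = PySem.List.min? js (fun v => v) := by
  cases js with
  | nil => rfl
  | cons x t => rw [List.foldl_cons, PySem.List.min?_id_cons]; exact pv_ominfold t x

theorem pv_maxfold_eq_max? (js : List Int) :
    js.foldl pvOmax none = PySem.List.max? js (fun v => v) := by
  cases js with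
  | nil => rfl
  | cons x t => rw [List.foldl_cons, PySem.List.max?_id_cons]; exact pv_omaxfold t x

-- min?/max? on a strictly increasing list are head?/getLast?
theorem pv_foldl_min_of_le (t : List Int) : ∀ x : Int, (∀ y ∈ t, x ≤ y) → t.foldl min x = x := by
  induction t with
  | nil => intro x _; rfl
  | cons z t ih =>
    intro x h
    rw [List.foldl_cons, min_eq_left (h z (List.mem_cons_self))]
    exact ih x (fun y hy => h y (List.mem_cons_of_mem _ hy))

theorem pv_min?_sorted (l : List Int) (h : l.Pairwise (· < ·)) :
    PySem.List.min? l (fun v => v) = l.head? := by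
  cases l with
  | nil => rfl
  | cons x t =>
    rw [PySem.List.min?_id_cons, List.head?_cons]
    have := (List.pairwise_cons.mp h).1
    rw [pv_foldl_min_of_le t x (fun y hy => le_of_lt (this y hy))]

theorem pv_le_getLast (l : List Int) (h : l.Pairwise (· < ·)) (hne : l ≠ []) :
    ∀ y ∈ l, y ≤ l.getLast hne := by
  induction l with
  | nil => exact absurd rfl hne
  | cons x t ih =>
    intro y hy
    cases t with
    | nil => simp at hy; simp [hy]
    | cons z s =>
      rw [List.getLast_cons (by simp)]
      rcases List.mem_cons.mp hy with rfl | hyt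
      · have hlast : (z :: s).getLast (by simp) ∈ z :: s := List.getLast_mem _
        exact le_of_lt ((List.pairwise_cons.mp h).1 _ hlast)
      · exact ih (List.pairwise_cons.mp h).2 (by simp) y hyt

theorem pv_max?_sorted (l : List Int) (h : l.Pairwise (· < ·)) :
    PySem.List.max? l (fun v => v) = l.getLast? := by
  cases l with
  | nil => rfl
  | cons x t =>
    have hne : x :: t ≠ [] := by simp
    rw [List.getLast?_eq_some_getLast hne]
    cases hm : PySem.List.max? (x :: t) (fun v => v) with
    | none => simp [PySem.List.max?_eq_none_iff] at hm
    | some m =>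
      have hmem := PySem.List.max?_mem hm
      have hmax := PySem.List.max?_isMax hm
      have h1 : m ≤ (x :: t).getLast hne := pv_le_getLast _ h hne m hmem
      have h2 : (x :: t).getLast hne ≤ m := hmax _ (List.getLast_mem hne)
      rw [le_antisymm h1 h2]

-- min?/max? only depend on the set of members
theorem pv_min?_congr (l l' : List Int) (h : ∀ v : Int, v ∈ l ↔ v ∈ l') :
    PySem.List.min? l (fun v => v) = PySem.List.min? l' (fun v => v) := by
  cases h1 : PySem.List.min? l (fun v => v) with
  | none =>
    have := (PySem.List.min?_eq_none_iff l _).mp h1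
    subst this
    cases h2 : PySem.List.min? l' (fun v => v) with
    | none => rfl
    | some m => exact absurd ((h m).mpr (PySem.List.min?_mem h2)) (by simp)
  | some m =>
    cases h2 : PySem.List.min? l' (fun v => v) with
    | none =>
      have := (PySem.List.min?_eq_none_iff l' _).mp h2
      subst this
      exact absurd ((h m).mp (PySem.List.min?_mem h1)) (by simp)
    | some m' =>
      have e1 : m ≤ m' := PySem.List.min?_isMin h1 m' ((h m').mpr (PySem.List.min?_mem h2))
      have e2 : m' ≤ m := PySem.List.min?_isMin h2 m ((h m).mp (PySem.List.min?_mem h1))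
      rw [le_antisymm e1 e2]

theorem pv_max?_congr (l l' : List Int) (h : ∀ v : Int, v ∈ l ↔ v ∈ l') :
    PySem.List.max? l (fun v => v) = PySem.List.max? l' (fun v => v) := by
  cases h1 : PySem.List.max? l (fun v => v) with
  | none =>
    have := (PySem.List.max?_eq_none_iff l _).mp h1
    subst this
    cases h2 : PySem.List.max? l' (fun v => v) with
    | none => rfl
    | some m => exact absurd ((h m).mpr (PySem.List.max?_mem h2)) (by simp)
  | some m =>
    cases h2 : PySem.List.max? l' (fun v => v) with
    | none =>
      have := (PySem.List.max?_eq_none_iff l' _).mp h2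
      subst this
      exact absurd ((h m).mp (PySem.List.max?_mem h1)) (by simp)
    | some m' =>
      have e1 : m ≤ m' := PySem.List.max?_isMax h2 m ((h m).mp (PySem.List.max?_mem h1))
      have e2 : m' ≤ m := PySem.List.max?_isMax h1 m' ((h m').mpr (PySem.List.max?_mem h2))
      rw [le_antisymm e1 e2]

theorem croped_main (lst : List (List Int)) (hpre : Pre_croped lst) :
    croped lst = croped_alt lst := by
  obtain ⟨hne, hrect, r1, hr1mem, hr11⟩ := hpre
  -- the first row's accessor
  have hw : PySem.List.pyGetD lst 0 [] = lst.headD [] := by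
    rw [PySem.List.pyGetD_zero]
    cases lst with
    | nil => exact absurd rfl hne
    | cons h t => rfl
  -- B's filtered row-index list is A's
  have hLx : pvLx (PySem.List.enumerate lst 0)
      = (PySem.List.pyRange 0 (lst.length : Int) 1).filter
          (fun x => decide ((1 : Int) ∈ PySem.List.pyGetD lst x [])) := by
    rw [show PySem.List.enumerate lst 0 = PySem.List.enumerate lst from rfl]
    rw [PySem.List.enumerate_eq_map_pyRange lst ([] : List Int)]
    rw [pvLx, List.filter_map, List.map_map]
    simp [Function.comp_def, PySem.List.len_eq]
  have hpair : ((PySem.List.pyRange 0 (lst.length : Int) 1).filter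
      (fun x => decide ((1 : Int) ∈ PySem.List.pyGetD lst x []))).Pairwise (· < ·) :=
    (PySem.List.pairwise_lt_pyRange_one 0 _).filter _
  have hxmin := pv_min?_sorted _ hpair
  have hxmax := pv_max?_sorted _ hpair
  -- membership correspondence for the column indices
  have hymem : ∀ v : Int,
      (v ∈ (PySem.List.pyRange 0 ((lst.headD []).length : Int) 1).flatMap
          (fun y => ((PySem.List.pyRange 0 (lst.length : Int) 1).filter
              (fun x => decide (PySem.List.pyGetD (PySem.List.pyGetD lst x []) y 0 ≠ 0))).map
            (fun _ => y)))
      ↔ v ∈ pvJs (PySem.List.enumerate lst 0) := by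
    intro v
    constructor
    · intro hv
      rw [List.mem_flatMap] at hv
      obtain ⟨y, hy, hv⟩ := hv
      rw [List.mem_map] at hv
      obtain ⟨x, hx, rfl⟩ := hv
      rw [List.mem_filter] at hx
      obtain ⟨hxR, hcell⟩ := hx
      rw [PySem.List.mem_pyRange_one] at hy hxR
      have hrow : PySem.List.pyGetD lst x [] = lst[x.toNat]'(by omega) := by
        exact PySem.List.pyGetD_eq_getElem lst [] (by omega) (by omega)
      have hrlen : (lst[x.toNat]'(by omega)).length = (lst.headD []).length :=
        hrect _ (List.getElem_mem _)
      rw [pvJs, List.mem_map]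
      refine ⟨(y, PySem.List.pyGetD (PySem.List.pyGetD lst x []) y 0), ?_, rfl⟩
      rw [List.mem_filter]
      refine ⟨?_, hcell⟩
      rw [List.mem_flatMap]
      refine ⟨(x, PySem.List.pyGetD lst x []), ?_, ?_⟩
      · rw [PySem.List.mem_enumerate_iff]
        refine ⟨x.toNat, by omega, ?_⟩
        rw [hrow, show ((0 : Int) + (x.toNat : Int)) = x by omega]
      · rw [PySem.List.mem_enumerate_iff]
        refine ⟨y.toNat, by rw [hrow, hrlen]; omega, ?_⟩
        have hcv : PySem.List.pyGetD (PySem.List.pyGetD lst x []) y 0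
            = (PySem.List.pyGetD lst x [])[y.toNat]'(by rw [hrow, hrlen]; omega) := by
          exact PySem.List.pyGetD_eq_getElem _ 0 (by omega) (by rw [hrow, hrlen]; push_cast; omega)
        rw [hcv, show ((0 : Int) + (y.toNat : Int)) = y by omega]
    · intro hv
      rw [pvJs, List.mem_map] at hv
      obtain ⟨q, hq, rfl⟩ := hv
      rw [List.mem_filter] at hq
      obtain ⟨hqmem, hq2⟩ := hq
      rw [List.mem_flatMap] at hqmem
      obtain ⟨p, hp, hqp⟩ := hqmem
      rw [PySem.List.mem_enumerate_iff] at hp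
      obtain ⟨k, hk, rfl⟩ := hp
      rw [PySem.List.mem_enumerate_iff] at hqp
      obtain ⟨m, hm, rfl⟩ := hqp
      have hklen : (lst[k]).length = (lst.headD []).length := hrect _ (List.getElem_mem _)
      rw [List.mem_flatMap]
      refine ⟨(m : Int), ?_, ?_⟩
      · rw [PySem.List.mem_pyRange_one]
        constructor
        · omega
        · have : m < (lst.headD []).length := by rw [← hklen]; exact hm
          omega
      · rw [List.mem_map]
        refine ⟨(k : Int), ?_, by omega⟩
        rw [List.mem_filter]
        constructor
        · rw [PySem.List.mem_pyRange_one]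
          omega
        · have hm2 : m < lst[k].length := by simpa using hm
          have hrow : PySem.List.pyGetD lst (k : Int) [] = lst[k] := by
            rw [PySem.List.pyGetD_eq_getElem lst [] (by omega) (by push_cast; omega)]
            simp
          have hc : PySem.List.pyGetD (PySem.List.pyGetD lst (k : Int) []) (m : Int) 0
              = lst[k][m] := by
            rw [hrow, PySem.List.pyGetD_eq_getElem _ 0 (by omega) (by push_cast; omega)]
            simp
          simp only [hc]
          simpa using hq2
  have hymin := pv_min?_congr _ _ hymem
  have hymax := pv_max?_congr _ _ hymem
  -- nonemptiness of both index lists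
  obtain ⟨k, hk, hkr⟩ := List.mem_iff_getElem.mp hr1mem
  obtain ⟨m, hm, hmr⟩ := List.mem_iff_getElem.mp hr11
  have hLmem : (k : Int) ∈ (PySem.List.pyRange 0 (lst.length : Int) 1).filter
      (fun x => decide ((1 : Int) ∈ PySem.List.pyGetD lst x [])) := by
    rw [List.mem_filter]
    constructor
    · rw [PySem.List.mem_pyRange_one]; omega
    · have hrow : PySem.List.pyGetD lst (k : Int) [] = lst[k] := by
        rw [PySem.List.pyGetD_eq_getElem lst [] (by omega) (by push_cast; omega)]
        simp
      rw [hrow, hkr]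
      simpa using hr11
  have hjsmem : (m : Int) ∈ pvJs (PySem.List.enumerate lst 0) := by
    rw [pvJs, List.mem_map]
    refine ⟨((m : Int), (1 : Int)), ?_, rfl⟩
    rw [List.mem_filter]
    refine ⟨?_, by simp⟩
    rw [List.mem_flatMap]
    refine ⟨((k : Int), r1), ?_, ?_⟩
    · rw [PySem.List.mem_enumerate_iff]
      exact ⟨k, hk, by simp [hkr]⟩
    · rw [PySem.List.mem_enumerate_iff]
      exact ⟨m, hm, by simp [hmr]⟩
  -- extract the four bounds
  obtain ⟨x0, hx0⟩ : ∃ v, (List.head? ((PySem.List.pyRange 0 (lst.length : Int) 1).filter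
      (fun x => decide ((1 : Int) ∈ PySem.List.pyGetD lst x [])))) = some v := by
    cases hh : List.head? ((PySem.List.pyRange 0 (lst.length : Int) 1).filter
      (fun x => decide ((1 : Int) ∈ PySem.List.pyGetD lst x []))) with
    | none => rw [List.head?_eq_none_iff] at hh; rw [hh] at hLmem; simp at hLmem
    | some v => exact ⟨v, rfl⟩
  obtain ⟨xN, hxN⟩ : ∃ v, (List.getLast? ((PySem.List.pyRange 0 (lst.length : Int) 1).filter
      (fun x => decide ((1 : Int) ∈ PySem.List.pyGetD lst x [])))) = some v := by
    cases hh : List.getLast? ((PySem.List.pyRange 0 (lst.length : Int) 1).filter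
      (fun x => decide ((1 : Int) ∈ PySem.List.pyGetD lst x []))) with
    | none => rw [List.getLast?_eq_none_iff] at hh; rw [hh] at hLmem; simp at hLmem
    | some v => exact ⟨v, rfl⟩
  obtain ⟨y0, hy0⟩ : ∃ v, PySem.List.min? (pvJs (PySem.List.enumerate lst 0)) (fun v => v)
      = some v := by
    cases hh : PySem.List.min? (pvJs (PySem.List.enumerate lst 0)) (fun v => v) with
    | none => rw [PySem.List.min?_eq_none_iff] at hh; rw [hh] at hjsmem; simp at hjsmem
    | some v => exact ⟨v, rfl⟩
  obtain ⟨yN, hyN⟩ : ∃ v, PySem.List.max? (pvJs (PySem.List.enumerate lst 0)) (fun v => v)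
      = some v := by
    cases hh : PySem.List.max? (pvJs (PySem.List.enumerate lst 0)) (fun v => v) with
    | none => rw [PySem.List.max?_eq_none_iff] at hh; rw [hh] at hjsmem; simp at hjsmem
    | some v => exact ⟨v, rfl⟩
  -- assemble
  simp only [croped, croped_alt]
  rw [pv_Bfold, hLx, Option.none_or, Option.or_none, pv_minfold_eq_min?, pv_maxfold_eq_max?,
    hw, hxmin, hxmax, hymin, hymax, hx0, hxN, hy0, hyN]
  rfl

-- ===== VERDICT (by name: the statement is the Claim_ definition above) =====
theorem croped_spec : Claim_equal_croped := by
  intro lst _ hpre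
  simpa [Spec_croped] using croped_main lst hpre
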